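-- pv_equiv track=rewrite | github.com/gtx6901/MaCA-project | marl_train/ppo_update.py | build_recurrent_chunks
-- ===== SOURCE A (Python) =====
-- def build_recurrent_chunks(rollout_steps: int, num_envs: int, num_agents: int, chunk_len: int):
--     chunks = []
--     for env_idx in range(num_envs):
--         for agent_idx in range(num_agents):
--             start = 0
--             while start < rollout_steps:
--                 end = min(rollout_steps, start + chunk_len)
--                 chunks.append((env_idx, agent_idx, start, end))
--                 start = end
--     return chunks
-- ===== SOURCE B (Python) =====
-- def build_recurrent_chunks(rollout_steps: int, num_envs: int, num_agents: int, chunk_len: int):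
--     # Closed-form flat enumeration: compute the chunk count by ceiling division and
--     # decode each flat index i into (env, agent, segment) by div/mod arithmetic.
--     if rollout_steps <= 0 or num_envs <= 0 or num_agents <= 0:
--         return []
--     num_chunks = -(-rollout_steps // chunk_len)
--     pair = num_chunks * num_agents
--     total = num_envs * pair
--     return [(i // pair,
--              (i // num_chunks) % num_agents,
--              (i % num_chunks) * chunk_len,
--              min(rollout_steps, (i % num_chunks) * chunk_len + chunk_len))
--             for i in range(total)]
-- ===== Notes on version B (the rewrite author's own statement) =====
-- stated objective: alternative
-- what changed: B replaces A's nested for-loops with an inner while loop by a closed-form flat enumeration: it computes the chunk count once by ceiling division and decodes each flat index i in range(num_envs*num_agents*num_chunks) into (env, agent, start, end) by div/mod arithmetic, with no while loop at all.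
import Mathlib
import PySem

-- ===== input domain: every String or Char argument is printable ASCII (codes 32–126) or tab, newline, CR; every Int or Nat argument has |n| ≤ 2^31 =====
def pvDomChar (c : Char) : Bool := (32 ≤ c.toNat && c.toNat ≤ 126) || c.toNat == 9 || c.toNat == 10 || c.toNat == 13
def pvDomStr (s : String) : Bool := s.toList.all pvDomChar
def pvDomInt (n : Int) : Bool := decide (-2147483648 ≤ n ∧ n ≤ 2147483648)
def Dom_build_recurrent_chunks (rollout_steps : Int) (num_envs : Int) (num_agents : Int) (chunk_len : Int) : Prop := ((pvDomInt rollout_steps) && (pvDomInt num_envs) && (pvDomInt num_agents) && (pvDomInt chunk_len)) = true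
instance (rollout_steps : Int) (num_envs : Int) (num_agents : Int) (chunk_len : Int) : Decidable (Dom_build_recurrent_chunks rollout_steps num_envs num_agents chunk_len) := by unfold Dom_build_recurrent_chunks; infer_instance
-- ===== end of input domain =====

-- B replaces A's nested loops with an inner while loop by a closed-form flat enumeration:
-- chunk count by ceiling division, each flat index decoded into (env, agent, start, end)
-- by div/mod arithmetic (objective: alternative).

-- ===== PORT A =====
-- the inner 'while start < rollout_steps' loop of A; when the loop would not advance
-- (min rollout_steps (start+chunk_len) ≤ start, i.e. chunk_len ≤ 0 with start < rollout_steps)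
-- the Python loops forever — such inputs are outside Pre_ and the port just stops there.
def pyChunkWhile (rollout_steps chunk_len env_idx agent_idx : Int) (start : Int)
    (chunks : List (Int × Int × Int × Int)) : List (Int × Int × Int × Int) :=
  if _h : start < rollout_steps then
    -- end = min(rollout_steps, start + chunk_len), written inline
    if _h2 : start < min rollout_steps (start + chunk_len) then
      pyChunkWhile rollout_steps chunk_len env_idx agent_idx (min rollout_steps (start + chunk_len))
        (chunks ++ [(env_idx, agent_idx, start, min rollout_steps (start + chunk_len))])
    else
      chunks  -- Python diverges here (the loop never advances); unreachable under Pre_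
  else chunks
termination_by (rollout_steps - start).toNat
decreasing_by omega

def build_recurrent_chunks (rollout_steps : Int) (num_envs : Int) (num_agents : Int) (chunk_len : Int) : List (Int × Int × Int × Int) :=
  (PySem.List.pyRange 0 num_envs 1).foldl (fun chunks env_idx =>
    (PySem.List.pyRange 0 num_agents 1).foldl (fun chunks agent_idx =>
      pyChunkWhile rollout_steps chunk_len env_idx agent_idx 0 chunks) chunks) []

-- ===== PORT B =====
def build_recurrent_chunks_alt (rollout_steps : Int) (num_envs : Int) (num_agents : Int) (chunk_len : Int) : List (Int × Int × Int × Int) :=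
  if rollout_steps ≤ 0 ∨ num_envs ≤ 0 ∨ num_agents ≤ 0 then []
  else
    let num_chunks := -(PySem.Int.floordiv (-rollout_steps) chunk_len)
    let pair := num_chunks * num_agents
    let total := num_envs * pair
    (PySem.List.pyRange 0 total 1).map (fun i =>
      (PySem.Int.floordiv i pair,
       PySem.Int.mod (PySem.Int.floordiv i num_chunks) num_agents,
       PySem.Int.mod i num_chunks * chunk_len,
       min rollout_steps (PySem.Int.mod i num_chunks * chunk_len + chunk_len)))

-- ===== PRECONDITION & SPEC =====
-- Pre_ excludes exactly the inputs on which A never returns: with chunk_len ≤ 0,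
-- rollout_steps > 0, num_envs > 0 and num_agents > 0 A's while loop never advances
-- and the Python hangs; everywhere else A returns normally.
def Pre_build_recurrent_chunks (rollout_steps : Int) (num_envs : Int) (num_agents : Int) (chunk_len : Int) : Prop :=
  0 < chunk_len ∨ rollout_steps ≤ 0 ∨ num_envs ≤ 0 ∨ num_agents ≤ 0
instance (rollout_steps : Int) (num_envs : Int) (num_agents : Int) (chunk_len : Int) : Decidable (Pre_build_recurrent_chunks rollout_steps num_envs num_agents chunk_len) := by unfold Pre_build_recurrent_chunks; infer_instance

def pvWitness_build_recurrent_chunks : Int × Int × Int × Int := (5, 2, 2, 2)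

def Spec_build_recurrent_chunks (rollout_steps : Int) (num_envs : Int) (num_agents : Int) (chunk_len : Int) (out : List (Int × Int × Int × Int)) : Prop := out = build_recurrent_chunks_alt rollout_steps num_envs num_agents chunk_len
instance (rollout_steps : Int) (num_envs : Int) (num_agents : Int) (chunk_len : Int) (out : List (Int × Int × Int × Int)) : Decidable (Spec_build_recurrent_chunks rollout_steps num_envs num_agents chunk_len out) := by unfold Spec_build_recurrent_chunks; infer_instance

-- ===== CLAIM (what is proved, stated in full; the proofs are below) =====
def Claim_equal_build_recurrent_chunks : Prop := ∀ (rollout_steps : Int) (num_envs : Int) (num_agents : Int) (chunk_len : Int), Dom_build_recurrent_chunks rollout_steps num_envs num_agents chunk_len → Pre_build_recurrent_chunks rollout_steps num_envs num_agents chunk_len → Spec_build_recurrent_chunks rollout_steps num_envs num_agents chunk_len (build_recurrent_chunks rollout_steps num_envs num_agents chunk_len)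

-- ===== LEMMAS AND PROOFS =====

-- A's inner loop exits immediately once start ≥ rollout_steps
theorem pyChunkWhile_exit (R L e a s : Int) (acc : List (Int × Int × Int × Int)) (h : R ≤ s) :
    pyChunkWhile R L e a s acc = acc := by
  rw [pyChunkWhile, dif_neg (not_lt.mpr h)]

-- closed form of A's inner while loop: starting at j·L with d = kn − j chunks left,
-- it appends one tuple per remaining chunk (kn = ceiling of R / L, bracketted by hup/hlow)
theorem pyChunkWhile_closed (R L : Int) (hL : 0 < L) (kn : ℕ)
    (hup : R ≤ (kn : Int) * L) (hlow : ((kn : Int) - 1) * L < R) :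
    ∀ (d j : ℕ), j + d = kn → ∀ (e a : Int) (acc : List (Int × Int × Int × Int)),
      pyChunkWhile R L e a ((j : Int) * L) acc
        = acc ++ (List.range d).map
            (fun t => (e, a, ((j + t : ℕ) : Int) * L, min R (((j + t : ℕ) : Int) * L + L))) := by
  intro d
  induction d with
  | zero =>
    intro j hj e a acc
    have hj' : j = kn := by omega
    subst hj'
    rw [pyChunkWhile_exit _ _ _ _ _ _ hup]
    simp
  | succ d ih =>
    intro j hj e a acc
    have hjle : (j : Int) ≤ (kn : Int) - 1 := by
      have : j + 1 ≤ kn := by omega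
      push_cast
      omega
    have hstart : (j : Int) * L < R :=
      lt_of_le_of_lt (mul_le_mul_of_nonneg_right hjle hL.le) hlow
    rw [pyChunkWhile, dif_pos hstart,
        dif_pos (lt_min hstart (by linarith))]
    by_cases hcase : ((j : Int) + 1) * L ≤ R
    · have hmin : min R ((j : Int) * L + L) = ((j + 1 : ℕ) : Int) * L := by
        push_cast
        rw [min_eq_right (by linarith)]
        ring
      rw [hmin, ih (j + 1) (by omega) e a _]
      rw [List.range_succ_eq_map, List.map_cons, List.map_map]
      simp only [List.append_assoc, List.singleton_append, Nat.add_zero]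
      congr 2
      · rw [← hmin]
      · apply List.map_congr_left
        intro t _
        simp only [Function.comp_apply, Nat.succ_eq_add_one]
        rw [show j + 1 + t = j + (t + 1) by omega]
  -- the loop's last step: min clamps to R, the next iteration exits
    · push_neg at hcase
      have hj1 : j + 1 = kn := by
        by_contra hne
        have h1 : (j : Int) + 1 ≤ (kn : Int) - 1 := by
          have : j + 1 + 1 ≤ kn := by omega
          push_cast
          omega
        have h2 : ((j : Int) + 1) * L ≤ ((kn : Int) - 1) * L :=
          mul_le_mul_of_nonneg_right h1 hL.le
        linarith
      have hd0 : d = 0 := by omega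
      subst hd0
      have hmin : min R ((j : Int) * L + L) = R :=
        min_eq_left (by nlinarith [hcase])
      rw [hmin, pyChunkWhile_exit _ _ _ _ _ _ le_rfl]
      simp [hmin]

-- a map over range (E·m) splits into E blocks of m by div/mod on the index
theorem range_mul_map_decomp {α : Type} (E m : ℕ) (g : ℕ → ℕ → α) :
    (List.range (E * m)).map (fun i => g (i / m) (i % m))
      = (List.range E).flatMap (fun e => (List.range m).map (fun r => g e r)) := by
  induction E with
  | zero => simp
  | succ E ih =>
    rcases Nat.eq_zero_or_pos m with hm | hm
    · subst hm; simp
    · rw [show (E + 1) * m = E * m + m by ring, List.range_add, List.map_append, ih,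
          List.range_succ, List.flatMap_append]
      congr 1
      simp only [List.flatMap_cons, List.flatMap_nil, List.append_nil, List.map_map]
      apply List.map_congr_left
      intro r hr
      have hrm : r < m := List.mem_range.mp hr
      simp only [Function.comp_apply]
      congr 1
      · rw [Nat.add_comm, Nat.add_mul_div_right _ _ hm, Nat.div_eq_of_lt hrm, Nat.zero_add]
      · rw [Nat.add_comm, Nat.add_mul_mod_self_right, Nat.mod_eq_of_lt hrm]

-- ===== VERDICT (by name: the statement is the Claim_ definition above) =====
theorem build_recurrent_chunks_spec : Claim_equal_build_recurrent_chunks := by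
  intro R E A L _hDom hPre
  unfold Spec_build_recurrent_chunks
  by_cases hdeg : R ≤ 0 ∨ E ≤ 0 ∨ A ≤ 0
  · -- degenerate inputs: both sides are []
    rw [build_recurrent_chunks_alt, if_pos hdeg]
    unfold build_recurrent_chunks
    rcases hdeg with hR | hE | hA
    · have : ∀ (e : Int) (chunks : List (Int × Int × Int × Int)),
          (PySem.List.pyRange 0 A 1).foldl (fun chunks a => pyChunkWhile R L e a 0 chunks) chunks
            = chunks := by
        intro e chunks
        rw [PySem.List.foldl_congr_mem _ _ (fun b _ => b) _
            (fun b x _ => pyChunkWhile_exit R L e x 0 b hR), List.foldl_fixed]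
      rw [PySem.List.foldl_congr_mem _ _ (fun b _ => b) _ (fun b x _ => this x b),
          List.foldl_fixed]
    · rw [PySem.List.pyRange_one_eq_nil hE, List.foldl_nil]
    · have : ∀ (e : Int) (chunks : List (Int × Int × Int × Int)),
          (PySem.List.pyRange 0 A 1).foldl (fun chunks a => pyChunkWhile R L e a 0 chunks) chunks
            = chunks := by
        intro e chunks
        rw [PySem.List.pyRange_one_eq_nil hA, List.foldl_nil]
      rw [PySem.List.foldl_congr_mem _ _ (fun b _ => b) _ (fun b x _ => this x b),
          List.foldl_fixed]
  · -- R > 0, E > 0, A > 0; Pre_ then gives 0 < L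
    push_neg at hdeg
    obtain ⟨hR, hE, hA⟩ := hdeg
    have hL : 0 < L := by
      rcases hPre with h | h | h | h
      · exact h
      all_goals omega
    -- the ceiling chunk count
    set kI : Int := -(PySem.Int.floordiv (-R) L) with hkI
    obtain ⟨hlow, hup⟩ := (PySem.Int.neg_floordiv_neg_eq_iff_of_pos (a := R) (q := kI) hL).mp rfl
    have hk1 : 1 ≤ kI := by
      by_contra hk
      push_neg at hk
      have : kI * L ≤ 0 := mul_nonpos_of_nonpos_of_nonneg (by omega) hL.le
      linarith
    set kn : ℕ := kI.toNat with hknd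
    have hknc : (kn : Int) = kI := Int.toNat_of_nonneg (by omega)
    set en : ℕ := E.toNat with hend
    have henc : (en : Int) = E := Int.toNat_of_nonneg (by omega)
    set an : ℕ := A.toNat with hand
    have hanc : (an : Int) = A := Int.toNat_of_nonneg (by omega)
    have hkn1 : 1 ≤ kn := by omega
    -- ---- B side: reduce to a flat Nat-range map and decompose it ----
    rw [build_recurrent_chunks_alt, if_neg (by push_neg; omega)]
    simp only [← hkI]
    have htot : E * (kI * A) = (((en * (an * kn) : ℕ)) : Int) := by
      push_cast
      rw [henc, hanc, hknc]
      ring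
    rw [htot, PySem.List.pyRange_one]
    simp only [Int.sub_zero, Int.toNat_natCast, zero_add, List.map_map]
    have hpair : kI * A = (((kn * an : ℕ)) : Int) := by push_cast; rw [hanc, hknc]
    have hB : ∀ t : ℕ,
        (PySem.Int.floordiv (t : Int) (kI * A),
         PySem.Int.mod (PySem.Int.floordiv (t : Int) kI) A,
         PySem.Int.mod (t : Int) kI * L,
         min R (PySem.Int.mod (t : Int) kI * L + L))
          = (((t / (an * kn) : ℕ) : Int), (((t % (an * kn)) / kn % an : ℕ) : Int),
             (((t % (an * kn)) % kn : ℕ) : Int) * L,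
             min R ((((t % (an * kn)) % kn : ℕ) : Int) * L + L)) := by
      intro t
      rw [hpair, ← hknc, ← hanc, PySem.Int.floordiv_natCast, PySem.Int.floordiv_natCast,
          PySem.Int.mod_natCast, PySem.Int.mod_natCast]
      have e1 : t / (kn * an) = t / (an * kn) := by rw [Nat.mul_comm]
      have e2 : t / kn % an = t % (an * kn) / kn % an := by
        conv_lhs => rw [← Nat.div_add_mod t (an * kn)]
        rw [show an * kn * (t / (an * kn)) + t % (an * kn)
              = t % (an * kn) + (an * (t / (an * kn))) * kn by ring,
            Nat.add_mul_div_right _ _ (by omega), Nat.add_mul_mod_self_left]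
      have e3 : t % kn = t % (an * kn) % kn := (Nat.mod_mod_of_dvd t ⟨an, by ring⟩).symm
      rw [e1, e2, e3]
    simp only [Function.comp_def]
    rw [List.map_congr_left (fun t _ => hB t)]
    rw [range_mul_map_decomp en (an * kn)
        (fun e r => (((e : ℕ) : Int), ((r / kn % an : ℕ) : Int),
          ((r % kn : ℕ) : Int) * L, min R (((r % kn : ℕ) : Int) * L + L)))]
    have hinner : ∀ e : ℕ,
        (List.range (an * kn)).map
            (fun r => (((e : ℕ) : Int), ((r / kn % an : ℕ) : Int),
              ((r % kn : ℕ) : Int) * L, min R (((r % kn : ℕ) : Int) * L + L)))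
          = (List.range an).flatMap (fun (a : ℕ) => (List.range kn).map
              (fun (s : ℕ) => ((e : Int), (a : Int), (s : Int) * L, min R ((s : Int) * L + L)))) := by
      intro e
      rw [range_mul_map_decomp an kn
          (fun a s => ((e : Int), ((a % an : ℕ) : Int), ((s : ℕ) : Int) * L,
            min R (((s : ℕ) : Int) * L + L)))]
      apply List.flatMap_congr
      intro a ha
      apply List.map_congr_left
      intro s _
      rw [Nat.mod_eq_of_lt (List.mem_range.mp ha)]
    simp only [List.flatMap_congr (fun e _ => hinner e)]
    -- ---- A side: inner while loop → per-(e,a) segment map → nested flatMap ----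
    unfold build_recurrent_chunks
    have hseg : ∀ (e a : Int) (acc : List (Int × Int × Int × Int)),
        pyChunkWhile R L e a 0 acc
          = acc ++ (List.range kn).map
              (fun (s : ℕ) => (e, a, (s : Int) * L, min R ((s : Int) * L + L))) := by
      intro e a acc
      have h0 := pyChunkWhile_closed R L hL kn (by rw [hknc]; exact hup) (by rw [hknc]; exact hlow)
        kn 0 (by omega) e a acc
      simpa using h0
    have hinnerA : ∀ (e : Int) (chunks : List (Int × Int × Int × Int)),
        (PySem.List.pyRange 0 A 1).foldl (fun chunks a => pyChunkWhile R L e a 0 chunks) chunks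
          = chunks ++ (PySem.List.pyRange 0 A 1).flatMap (fun a => (List.range kn).map
              (fun (s : ℕ) => (e, a, (s : Int) * L, min R ((s : Int) * L + L)))) := by
      intro e chunks
      rw [PySem.List.foldl_congr_mem _ _
          (fun chunks a => chunks ++ (List.range kn).map
            (fun (s : ℕ) => (e, a, (s : Int) * L, min R ((s : Int) * L + L)))) _
          (fun b x _ => hseg e x b)]
      exact PySem.List.foldl_append_eq_flatMap _ _ _
    rw [PySem.List.foldl_congr_mem _ _
        (fun chunks e => chunks ++ (PySem.List.pyRange 0 A 1).flatMap (fun a =>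
          (List.range kn).map (fun (s : ℕ) => (e, a, (s : Int) * L, min R ((s : Int) * L + L))))) _
        (fun b x _ => hinnerA x b)]
    rw [PySem.List.foldl_append_eq_flatMap]
    -- both sides: turn the Int pyRanges into Nat ranges and match
    rw [PySem.List.pyRange_one 0 E, PySem.List.pyRange_one 0 A]
    simp [← henc, ← hanc, List.flatMap_map]
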